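-- pv_equiv track=rewrite | github.com/isthatwhatyes/open_source_art_downloader | art_download_utils.py | _pick_best_per_canonical_asset
-- ===== SOURCE A (Python) =====
-- def _pick_best_per_canonical_asset(candidates: list[tuple[str, int, str]]) -> list[str]:
--     """
--     candidates: list of (canonical_key, score, url) in discovery order.
--     Returns best url per canonical_key, preserving first-seen asset order.
--     """
--     best: dict[str, tuple[int, str]] = {}
--     order: list[str] = []
--
--     for key, score, url in candidates:
--         if key not in best:
--             best[key] = (score, url)
--             order.append(key)
--         else:
--             if score > best[key][0]:
--                 best[key] = (score, url)
--
--     out: list[str] = []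
--     seen_urls: set[str] = set()
--     for key in order:
--         url = best[key][1]
--         if url not in seen_urls:
--             out.append(url)
--             seen_urls.add(url)
--     return out
-- ===== SOURCE B (Python) =====
-- def _pick_best_per_canonical_asset(candidates: list[tuple[str, int, str]]) -> list[str]:
--     # Bucket all candidates per canonical key (insertion order = first-seen key order),
--     # then take the first maximal-score url of each bucket (max keeps the first maximum,
--     # matching the strict-> update rule), deduplicating urls globally.
--     buckets: dict[str, list[tuple[int, str]]] = {}
--     for key, score, url in candidates:
--         buckets.setdefault(key, []).append((score, url))
--
--     out: list[str] = []
--     seen_urls: set[str] = set()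
--     for items in buckets.values():
--         url = max(items, key=lambda x: x[0])[1]
--         if url not in seen_urls:
--             out.append(url)
--             seen_urls.add(url)
--     return out
-- ===== Notes on version B (the rewrite author's own statement) =====
-- stated objective: alternative
-- what changed: Instead of maintaining a running best-(score,url) dict plus a separate key-order list, B groups all candidates into per-key buckets with setdefault/append and then takes the first maximal-score url of each bucket via max (relying on dict insertion order and on max returning the first maximum).
import Mathlib
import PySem

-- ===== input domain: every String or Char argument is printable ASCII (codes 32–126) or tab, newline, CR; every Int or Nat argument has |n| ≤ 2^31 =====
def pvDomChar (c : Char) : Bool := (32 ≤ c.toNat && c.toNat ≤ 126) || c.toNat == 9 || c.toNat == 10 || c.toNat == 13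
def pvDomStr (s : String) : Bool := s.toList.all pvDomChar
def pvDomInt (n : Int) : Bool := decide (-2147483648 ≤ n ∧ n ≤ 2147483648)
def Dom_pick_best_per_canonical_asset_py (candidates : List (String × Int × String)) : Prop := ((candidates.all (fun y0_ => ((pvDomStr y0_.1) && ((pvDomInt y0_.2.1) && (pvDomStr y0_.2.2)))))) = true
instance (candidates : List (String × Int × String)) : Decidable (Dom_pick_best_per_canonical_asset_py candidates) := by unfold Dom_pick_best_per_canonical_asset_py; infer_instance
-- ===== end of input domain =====

-- B replaces A's running-best dict + order list by a group-into-buckets pass followed by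
-- a first-maximum per bucket (alternative decomposition, same cost).


-- ===== PORT A =====
-- A's first loop: best dict of (score, url) per key, updated on strictly greater score,
-- plus the first-seen key order ('key not in best' and 'best[key]' ported via get?).
def pickBestAStep (st : PySem.Dict String (Int × String) × List String)
    (c : String × Int × String) : PySem.Dict String (Int × String) × List String :=
  match st.1.get? c.1 with
  | none => (st.1.insert c.1 c.2, st.2 ++ [c.1])
  | some b => if c.2.1 > b.1 then (st.1.insert c.1 c.2, st.2) else st

def pick_best_per_canonical_asset_py (candidates : List (String × Int × String)) : List String :=
  let st := candidates.foldl pickBestAStep (PySem.Dict.empty, [])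
  -- second loop: url = best[key][1] (key is always present, so getD's default is never used)
  (st.2.foldl (fun (acc : List String × PySem.Set String) key =>
      let url := (st.1.getD key ((0 : Int), "")).2
      if PySem.Set.contains acc.2 url then acc
      else (acc.1 ++ [url], PySem.Set.add acc.2 url))
    ([], PySem.Set.empty)).1

-- ===== PORT B =====
def pick_best_per_canonical_asset_py_alt (candidates : List (String × Int × String)) : List String :=
  -- buckets.setdefault(key, []).append((score, url))
  let buckets := candidates.foldl
    (fun (d : PySem.Dict String (List (Int × String))) c => d.modify c.1 [] (· ++ [c.2]))
    PySem.Dict.empty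
  -- url = max(items, key=lambda x: x[0])[1]; buckets only hold nonempty lists, so the
  -- empty-list case of max (where Python would raise) is unreachable: getD totalises it.
  (buckets.values.foldl (fun (acc : List String × PySem.Set String) items =>
      let url := ((PySem.List.max? items (fun x => x.1)).getD ((0 : Int), "")).2
      if PySem.Set.contains acc.2 url then acc
      else (acc.1 ++ [url], PySem.Set.add acc.2 url))
    ([], PySem.Set.empty)).1

-- ===== PRECONDITION & SPEC =====
def Spec_pick_best_per_canonical_asset_py (candidates : List (String × Int × String)) (out : List String) : Prop := out = pick_best_per_canonical_asset_py_alt candidates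
instance (candidates : List (String × Int × String)) (out : List String) : Decidable (Spec_pick_best_per_canonical_asset_py candidates out) := by unfold Spec_pick_best_per_canonical_asset_py; infer_instance

-- ===== CLAIM (what is proved, stated in full; the proofs are below) =====
def Claim_equal_pick_best_per_canonical_asset_py : Prop := ∀ (candidates : List (String × Int × String)), Dom_pick_best_per_canonical_asset_py candidates → Spec_pick_best_per_canonical_asset_py candidates (pick_best_per_canonical_asset_py candidates)

-- ===== LEMMAS AND PROOFS =====

-- the per-key sublist of (score, url) pairs, in encounter order
def pvBucket (cs : List (String × Int × String)) (k : String) : List (Int × String) :=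
  (cs.filter (fun c => c.1 == k)).map (·.2)

theorem pvBucket_cons (c : String × Int × String) (cs : List (String × Int × String)) (k : String) :
    pvBucket (c :: cs) k = if c.1 == k then c.2 :: pvBucket cs k else pvBucket cs k := by
  by_cases h : c.1 == k <;> simp [pvBucket, h]

-- invariant of A's first loop: the order list is the ordered set of keys seen so far,
-- and each key's entry is the running first-maximum of its bucket
theorem pickBestA_loop (cs : List (String × Int × String))
    (d : PySem.Dict String (Int × String)) (ord : List String)
    (h : ∀ k, (d.get? k).isSome = ord.contains k) :
    (cs.foldl pickBestAStep (d, ord)).2 = PySem.Set.update ord (cs.map (·.1)) ∧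
    ∀ k, (cs.foldl pickBestAStep (d, ord)).1.get? k =
      (pvBucket cs k).foldl
        (fun acc x => match acc with
          | none => some x
          | some m => if m.1 < x.1 then some x else some m)
        (d.get? k) := by
  induction cs generalizing d ord with
  | nil => exact ⟨rfl, fun k => rfl⟩
  | cons c cs ih =>
    have hcontains : ord.contains c.1 = (d.get? c.1).isSome := (h c.1).symm
    simp only [List.foldl_cons, List.map_cons, PySem.Set.update_cons]
    rcases hg : d.get? c.1 with _ | b
    · -- fresh key: insert and append to order
      have hstep : pickBestAStep (d, ord) c = (d.insert c.1 c.2, ord ++ [c.1]) := by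
        simp [pickBestAStep, hg]
      have hadd : PySem.Set.add ord c.1 = ord ++ [c.1] := by
        apply PySem.Set.add_of_not_mem
        intro hm
        have : ord.contains c.1 = true := by simpa using hm
        rw [hcontains, hg] at this; simp at this
      have h' : ∀ k, ((d.insert c.1 c.2).get? k).isSome = (ord ++ [c.1]).contains k := by
        intro k
        by_cases hk : k = c.1
        · subst hk; simp [PySem.Dict.get?_insert_self]
        · rw [PySem.Dict.get?_insert_of_ne _ _ hk, h k]
          simp [hk]
      obtain ⟨h1, h2⟩ := ih (d.insert c.1 c.2) (ord ++ [c.1]) h'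
      refine ⟨by rw [hstep, h1, hadd], fun k => ?_⟩
      rw [hstep, h2 k, pvBucket_cons]
      by_cases hk : c.1 = k
      · subst hk
        simp [PySem.Dict.get?_insert_self, hg]
      · have : (c.1 == k) = false := by simpa using hk
        rw [this, if_neg (by simp), PySem.Dict.get?_insert_of_ne _ _ (Ne.symm hk)]
    · -- existing key: order unchanged, entry updated on strictly greater score
      have hmem : PySem.Set.add ord c.1 = ord := by
        apply PySem.Set.add_of_mem
        have : ord.contains c.1 = true := by rw [hcontains, hg]; rfl
        simpa using this
      have hstate : pickBestAStep (d, ord) c =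
          if b.1 < c.2.1 then (d.insert c.1 c.2, ord) else (d, ord) := by
        simp [pickBestAStep, hg, GT.gt]
      by_cases hlt : b.1 < c.2.1
      · rw [hstate, if_pos hlt]
        have h' : ∀ k, ((d.insert c.1 c.2).get? k).isSome = ord.contains k := by
          intro k
          by_cases hk : k = c.1
          · rw [hk, PySem.Dict.get?_insert_self, ← h c.1, hg]; rfl
          · rw [PySem.Dict.get?_insert_of_ne _ _ hk, h k]
        obtain ⟨h1, h2⟩ := ih (d.insert c.1 c.2) ord h'
        refine ⟨by rw [h1, hmem], fun k => ?_⟩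
        rw [h2 k, pvBucket_cons]
        by_cases hk : c.1 = k
        · subst hk
          simp [PySem.Dict.get?_insert_self, hg, hlt]
        · have : (c.1 == k) = false := by simpa using hk
          rw [this, if_neg (by simp), PySem.Dict.get?_insert_of_ne _ _ (Ne.symm hk)]
      · rw [hstate, if_neg hlt]
        obtain ⟨h1, h2⟩ := ih d ord h
        refine ⟨by rw [h1, hmem], fun k => ?_⟩
        rw [h2 k, pvBucket_cons]
        by_cases hk : c.1 = k
        · subst hk
          simp [hg, hlt]
        · have : (c.1 == k) = false := by simpa using hk
          rw [this, if_neg (by simp)]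

-- A's running-maximum fold from none IS Python's max with key = fst
theorem pvMax_eq (l : List (Int × String)) :
    l.foldl
      (fun acc x => match acc with
        | none => some x
        | some m => if m.1 < x.1 then some x else some m)
      none = PySem.List.max? l (fun x => x.1) := by
  simp only [PySem.List.max?]
  congr 1
  funext acc x
  cases acc <;> rfl

-- the shared dedup loop, abstracted over how the url is produced from an element
theorem pvDedup_foldl_map {α : Type} (l : List α) (g : α → String)
    (acc : List String × PySem.Set String) :
    l.foldl (fun a x =>
        if PySem.Set.contains a.2 (g x) then a
        else (a.1 ++ [g x], PySem.Set.add a.2 (g x))) acc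
      = (l.map g).foldl (fun a url =>
          if PySem.Set.contains a.2 url then a
          else (a.1 ++ [url], PySem.Set.add a.2 url)) acc :=
  (List.foldl_map (f := g)
    (g := fun (a : List String × PySem.Set String) url =>
      if PySem.Set.contains a.2 url then a else (a.1 ++ [url], PySem.Set.add a.2 url))
    (l := l) (init := acc)).symm

-- ===== VERDICT (by name: the statement is the Claim_ definition above) =====
theorem pick_best_per_canonical_asset_py_spec : Claim_equal_pick_best_per_canonical_asset_py := by
  intro cs _dom
  unfold Spec_pick_best_per_canonical_asset_py
  simp only [pick_best_per_canonical_asset_py, pick_best_per_canonical_asset_py_alt]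
  obtain ⟨hord, hget⟩ := pickBestA_loop cs PySem.Dict.empty []
    (fun k => by simp [PySem.Dict.get?_empty])
  conv_lhs => rw [pvDedup_foldl_map]
  conv_rhs => rw [pvDedup_foldl_map]
  have hkeys : (cs.foldl
      (fun (d : PySem.Dict String (List (Int × String))) c => d.modify c.1 [] (· ++ [c.2]))
      PySem.Dict.empty).keys = PySem.Set.ofList (cs.map (·.1)) := by
    rw [PySem.Dict.keys_foldl_modify_key]
    simp [PySem.Set.update_nil_left]
  have hnd : (cs.foldl
      (fun (d : PySem.Dict String (List (Int × String))) c => d.modify c.1 [] (· ++ [c.2]))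
      PySem.Dict.empty).keys.Nodup := by
    rw [hkeys]; exact PySem.Set.nodup_ofList _
  rw [hord, PySem.Set.update_nil_left, PySem.Dict.values_eq_map_keys _ hnd [], hkeys,
    List.map_map]
  congr 1
  congr 1
  apply List.map_congr_left
  intro k _
  simp only [Function.comp]
  rw [PySem.Dict.getD_eq_get?_getD, hget k, PySem.Dict.get?_empty, pvMax_eq,
    PySem.Dict.getD_foldl_modify_append, PySem.Dict.getD_empty]
  rfl
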